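-- pv_equiv track=rewrite | github.com/RyanKor/javascript-datastructure-and-algorithms | kakao/2018_blind/automatic_completiton.py | solution
-- ===== SOURCE A (Python) =====
-- class Trie():
--     def __init__(self):
--         self.next = dict()
--         self.value = 0
--
-- def solution(words):
--     answer = 0
--     tree = Trie()
--     for word in words:
--         subtree = tree
--         for idx, val in enumerate(word):
--             subtree.value += 1
--             if val not in subtree.next:
--                 subtree.next[val] = Trie()
--             subtree = subtree.next[val]
--             if (idx == len(word) - 1):
--                 subtree.value += 1
--
--     for word in words:
--         subtree = tree
--         counts = 0
--         for idx, val in enumerate(word):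
--             if (subtree.value == 1):
--                 answer += counts
--                 break
--             elif idx == len(word) - 1:
--                 answer += counts + 1
--                 break
--             else:
--                 subtree = subtree.next[val]
--                 counts += 1
--     return answer
-- ===== SOURCE B (Python) =====
-- def lcp(a, b):
--     k = 0
--     while k < len(a) and k < len(b) and a[k] == b[k]:
--         k += 1
--     return k
--
--
-- def solution(words):
--     ws = sorted(w for w in words if w)
--     if len(ws) <= 1:
--         return 0
--     total = 0
--     for i, w in enumerate(ws):
--         m = 0
--         if i > 0:
--             m = max(m, lcp(ws[i - 1], w))
--         if i + 1 < len(ws):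
--             m = max(m, lcp(w, ws[i + 1]))
--         total += min(m + 1, len(w))
--     return total
-- ===== Notes on version B (the rewrite author's own statement) =====
-- stated objective: alternative
-- what changed: Replaces A's hand-built trie (per-character node/dict construction plus a second per-character counting walk) by sorting the nonempty words and giving each word min(maxLCP+1, len(word)) keystrokes, where maxLCP is the longest common prefix with its two sorted neighbours.
import Mathlib
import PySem

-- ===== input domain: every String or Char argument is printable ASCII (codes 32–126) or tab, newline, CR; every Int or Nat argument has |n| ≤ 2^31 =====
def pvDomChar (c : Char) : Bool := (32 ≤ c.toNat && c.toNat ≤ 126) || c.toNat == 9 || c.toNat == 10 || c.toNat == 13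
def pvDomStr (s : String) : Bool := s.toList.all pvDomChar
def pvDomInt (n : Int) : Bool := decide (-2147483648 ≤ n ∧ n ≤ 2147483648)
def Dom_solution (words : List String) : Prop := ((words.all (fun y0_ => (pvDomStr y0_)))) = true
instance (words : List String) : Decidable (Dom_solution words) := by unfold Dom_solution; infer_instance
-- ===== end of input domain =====

-- B replaces A's hand-built trie by a different decomposition: sort the nonempty words and give
-- each word min(maxLCP+1, len(word)) keystrokes, maxLCP taken over its two sorted neighbours.

-- ===== PORT A =====
-- The Python Trie is a tree of nodes each carrying a mutable int `value`; a node is uniquely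
-- identified by its path of chars from the root, so the trie state is ported EXACTLY as a
-- finite map from node path to node value.  (The `if val not in subtree.next` node-creation
-- bookkeeping only materialises child nodes with value 0 before they are incremented; only
-- `value` is ever read, so the map of values is the whole observable state.)
def pvIncr (m : PySem.Dict (List Char) Int) (p : List Char) : PySem.Dict (List Char) Int :=
  m.insert p (m.getD p 0 + 1)

-- first loop body of A: `for idx, val in enumerate(word)`, walking down from node `path`;
-- `idx == len(word) - 1` is exactly `rest = []`
def pvIns (m : PySem.Dict (List Char) Int) (path : List Char) : List Char → PySem.Dict (List Char) Int
  | [] => m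
  | c :: rest =>
    let m1 := pvIncr m path
    if rest = [] then pvIncr m1 (path ++ [c]) else pvIns m1 (path ++ [c]) rest

def pvBuild (words : List String) : PySem.Dict (List Char) Int :=
  words.foldl (fun m w => pvIns m [] w.toList) PySem.Dict.empty

-- second loop body of A for one word: `subtree` is the node at `path`, `counts` as in A
def pvCount (m : PySem.Dict (List Char) Int) (path : List Char) (counts : Int) : List Char → Int
  | [] => 0
  | c :: rest =>
    if m.getD path 0 = 1 then counts
    else if rest = [] then counts + 1
    else pvCount m (path ++ [c]) (counts + 1) rest

def solution (words : List String) : Int :=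
  let tree := pvBuild words
  words.foldl (fun answer w => answer + pvCount tree [] 0 w.toList) 0

-- ===== PORT B =====
-- `lcp(a, b)`: the while loop walks matching leading chars; ported as structural recursion
-- over the two char lists (exact: k < len(a) and k < len(b) and a[k] == b[k])
def lcpChars : List Char → List Char → Int
  | a :: as, b :: bs => if a = b then 1 + lcpChars as bs else 0
  | _, _ => 0

-- body of B's loop: m = 0; maxed with the LCPs of the existing neighbours of position i
def pvNbrMax (ws : List String) (i : Int) (w : String) : Int :=
  let m : Int := 0
  let m := if 0 < i then max m (lcpChars (PySem.List.pyGetD ws (i - 1) "").toList w.toList) else m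
  if i + 1 < (ws.length : Int) then max m (lcpChars w.toList (PySem.List.pyGetD ws (i + 1) "").toList) else m

def solution_alt (words : List String) : Int :=
  let ws := PySem.List.sorted (words.filter (fun w => decide (w ≠ ""))) (fun x => x) false
  if ws.length ≤ 1 then 0
  else
    (PySem.List.enumerate ws).foldl
      (fun total iw => total + min (pvNbrMax ws iw.1 iw.2 + 1) (PySem.Str.len iw.2)) 0

-- ===== PRECONDITION & SPEC =====
def Spec_solution (words : List String) (out : Int) : Prop := out = solution_alt words
instance (words : List String) (out : Int) : Decidable (Spec_solution words out) := by unfold Spec_solution; infer_instance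

-- ===== CLAIM (what is proved, stated in full; the proofs are below) =====
def Claim_equal_solution : Prop := ∀ (words : List String), Dom_solution words → Spec_solution words (solution words)

-- ===== LEMMAS AND PROOFS =====

lemma lcp_nonneg (a b : List Char) : 0 ≤ lcpChars a b := by
  induction a generalizing b with
  | nil => simp [lcpChars]
  | cons x as ih =>
    cases b with
    | nil => simp [lcpChars]
    | cons y bs => simp only [lcpChars]; split <;> [linarith [ih bs]; simp]

lemma lcp_comm (a b : List Char) : lcpChars a b = lcpChars b a := by
  induction a generalizing b with
  | nil => cases b <;> simp [lcpChars]
  | cons x as ih =>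
    cases b with
    | nil => simp [lcpChars]
    | cons y bs =>
      simp only [lcpChars]
      by_cases h : x = y
      · subst h; simp [ih bs]
      · rw [if_neg h, if_neg (Ne.symm h)]

lemma lcp_ge_iff (k : Nat) (a b : List Char) (hk : k ≤ a.length) :
    ((k : Int) ≤ lcpChars a b ↔ a.take k <+: b) := by
  induction k generalizing a b with
  | zero => simpa using lcp_nonneg a b
  | succ k ih =>
    cases a with
    | nil => simp at hk
    | cons x as =>
      cases b with
      | nil => simp [lcpChars]
      | cons y bs =>
        simp only [lcpChars, List.take_succ_cons, List.cons_prefix_cons]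
        by_cases h : x = y
        · subst h
          simp only [true_and]
          rw [← ih as bs (by simpa using hk)]
          push_cast
          omega
        · simp only [if_neg h]
          constructor
          · intro hle; exfalso; push_cast at hle; omega
          · rintro ⟨rfl, -⟩; exact absurd rfl h

lemma getD_pvIncr (m : PySem.Dict (List Char) Int) (q p : List Char) :
    (pvIncr m q).getD p 0 = m.getD p 0 + (if p = q then 1 else 0) := by
  unfold pvIncr
  rw [PySem.Dict.getD_insert]
  split <;> simp_all

lemma prefix_single {t : List Char} {c : Char} : t <+: [c] ↔ t = [] ∨ t = [c] := by
  constructor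
  · rintro ⟨u, hu⟩
    cases t with
    | nil => exact Or.inl rfl
    | cons a t' =>
      simp only [List.cons_append, List.cons.injEq] at hu
      obtain ⟨rfl, hu2⟩ := hu
      have : t' = [] := by
        cases t' with
        | nil => rfl
        | cons b t'' => simp at hu2
      subst this
      exact Or.inr rfl
  · rintro (rfl | rfl) <;> simp

lemma getD_pvIns (v : List Char) : ∀ (m : PySem.Dict (List Char) Int) (path p : List Char),
    (pvIns m path v).getD p 0 =
      m.getD p 0 + (if v ≠ [] ∧ path <+: p ∧ p.drop path.length <+: v then 1 else 0) := by
  induction v with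
  | nil => intro m path p; simp [pvIns]
  | cons c rest ih =>
    intro m path p
    simp only [pvIns]
    by_cases hr : rest = []
    · subst hr
      rw [if_pos rfl, getD_pvIncr, getD_pvIncr]
      have hne : path ≠ path ++ [c] := by simp
      by_cases h1 : p = path
      · subst h1
        have hC : (c :: [] ≠ []) ∧ p <+: p ∧ p.drop p.length <+: [c] := by
          refine ⟨by simp, List.prefix_refl _, by simp⟩
        rw [if_pos rfl, if_neg hne, if_pos hC]
        omega
      · by_cases h2 : p = path ++ [c]
        · subst h2
          have hC : (c :: [] ≠ []) ∧ path <+: path ++ [c] ∧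
              (path ++ [c]).drop path.length <+: [c] := by
            refine ⟨by simp, List.prefix_append _ _, by simp⟩
          rw [if_neg h1, if_pos rfl, if_pos hC]
          omega
        · have hC : ¬ ((c :: [] ≠ []) ∧ path <+: p ∧ p.drop path.length <+: [c]) := by
            rintro ⟨-, ⟨t, rfl⟩, hd⟩
            rw [List.drop_left] at hd
            rcases prefix_single.mp hd with rfl | rfl
            · exact h1 (by simp)
            · exact h2 rfl
          rw [if_neg h1, if_neg h2, if_neg hC]
          omega
    · rw [if_neg hr, ih (pvIncr m path) (path ++ [c]) p, getD_pvIncr]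
      by_cases h1 : p = path
      · subst h1
        have hA : ¬ ((rest ≠ []) ∧ p ++ [c] <+: p ∧ p.drop (p ++ [c]).length <+: rest) := by
          rintro ⟨-, hpre, -⟩
          have := hpre.length_le
          simp at this
        have hB : (c :: rest ≠ []) ∧ p <+: p ∧ p.drop p.length <+: c :: rest := by
          refine ⟨by simp, List.prefix_refl _, by simp⟩
        rw [if_pos rfl, if_neg hA, if_pos hB]
        omega
      · rw [if_neg h1]
        have hiff : ((rest ≠ []) ∧ path ++ [c] <+: p ∧ p.drop (path ++ [c]).length <+: rest)
            ↔ ((c :: rest ≠ []) ∧ path <+: p ∧ p.drop path.length <+: c :: rest) := by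
          constructor
          · rintro ⟨-, ⟨t, rfl⟩, hd⟩
            rw [List.drop_left] at hd
            refine ⟨by simp, ⟨[c] ++ t, by simp⟩, ?_⟩
            rw [List.append_assoc, List.drop_left]
            exact List.cons_prefix_cons.mpr ⟨rfl, hd⟩
          · rintro ⟨-, ⟨t, rfl⟩, hd⟩
            rw [List.drop_left] at hd
            cases t with
            | nil => exact absurd (by simp) h1
            | cons a t' =>
              obtain ⟨rfl, ht'⟩ := List.cons_prefix_cons.mp hd
              refine ⟨hr, ⟨t', by simp⟩, ?_⟩
              rw [show path ++ a :: t' = (path ++ [a]) ++ t' by simp, List.drop_left]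
              exact ht'
        by_cases hc2 : (rest ≠ []) ∧ path ++ [c] <+: p ∧ p.drop (path ++ [c]).length <+: rest
        · rw [if_pos hc2, if_pos (hiff.mp hc2)]; omega
        · rw [if_neg hc2, if_neg (fun h => hc2 (hiff.mpr h))]; omega

lemma getD_pvBuild_go (l : List String) : ∀ (m : PySem.Dict (List Char) Int) (p : List Char),
    (l.foldl (fun m w => pvIns m [] w.toList) m).getD p 0 =
      m.getD p 0 + ((l.countP (fun u => decide (u.toList ≠ [] ∧ p <+: u.toList))) : Int) := by
  induction l with
  | nil => intro m p; simp
  | cons u l ih =>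
    intro m p
    rw [List.foldl_cons, ih, getD_pvIns, List.countP_cons]
    have hcond : (u.toList ≠ [] ∧ ([] : List Char) <+: p ∧ p.drop ([] : List Char).length <+: u.toList)
        ↔ (u.toList ≠ [] ∧ p <+: u.toList) := by
      simp [List.nil_prefix]
    by_cases hc : u.toList ≠ [] ∧ p <+: u.toList
    · rw [if_pos (hcond.mpr hc),
        show (decide (u.toList ≠ [] ∧ p <+: u.toList)) = true by simp [hc.1, hc.2],
        if_pos (by simp)]
      push_cast
      ring
    · rw [if_neg (fun h => hc (hcond.mp h)),
        show (decide (u.toList ≠ [] ∧ p <+: u.toList)) = false by simpa using hc,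
        if_neg (by simp)]
      push_cast
      ring

lemma getD_pvBuild (words : List String) (p : List Char) :
    (pvBuild words).getD p 0 =
      ((words.countP (fun u => decide (u.toList ≠ [] ∧ p <+: u.toList))) : Int) := by
  unfold pvBuild
  rw [getD_pvBuild_go]
  simp

-- the scan of A's second loop, generalized over the position in the word
lemma pvCount_go (m : PySem.Dict (List Char) Int) (w : List Char) (B : Int)
    (heq : ∀ k : Nat, k < w.length → (m.getD (w.take k) 0 = 1 ↔ B < (k : Int))) :
    ∀ (rest path : List Char), path ++ rest = w → rest ≠ [] →
      (path.length : Int) - 1 ≤ B →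
      pvCount m path (path.length : Int) rest =
        if B < (path.length : Int) then (path.length : Int) else min (B + 1) (w.length : Int) := by
  intro rest
  induction rest with
  | nil => intro path _ hne _; exact absurd rfl hne
  | cons c rest' ih =>
    intro path hpw _ hBlow
    have hlen : path.length < w.length := by
      subst hpw; simp
    have hwlen : w.length = path.length + 1 + rest'.length := by
      subst hpw; simp; omega
    have htake : w.take path.length = path := by
      subst hpw; exact List.take_left
    have hiff := heq path.length hlen
    rw [htake] at hiff
    by_cases hc : m.getD path 0 = 1
    · have hBlt : B < (path.length : Int) := hiff.mp hc
      rw [show pvCount m path (path.length : Int) (c :: rest') = (path.length : Int) from by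
          simp [pvCount, hc],
        if_pos hBlt]
    · have hBge : (path.length : Int) ≤ B := by
        by_contra hlt
        exact hc (hiff.mpr (by omega))
      rw [if_neg (show ¬ B < (path.length : Int) by omega)]
      by_cases hr' : rest' = []
      · subst hr'
        simp only [List.length_nil] at hwlen
        rw [show pvCount m path (path.length : Int) [c] = (path.length : Int) + 1 from by
            simp [pvCount, hc]]
        omega
      · have hr1 : 1 ≤ rest'.length := by
          cases rest' with
          | nil => exact absurd rfl hr'
          | cons _ _ => simp
        rw [show pvCount m path (path.length : Int) (c :: rest')
              = pvCount m (path ++ [c]) ((path.length : Int) + 1) rest' from by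
            simp [pvCount, hc, hr']]
        have hpw' : (path ++ [c]) ++ rest' = w := by
          rw [List.append_assoc]; simpa using hpw
        have hlow' : ((path ++ [c]).length : Int) - 1 ≤ B := by
          simp; omega
        have hih := ih (path ++ [c]) hpw' hr' hlow'
        rw [show (path.length : Int) + 1 = (((path ++ [c]).length : Nat) : Int) from by
            simp, hih]
        have hl2 : (((path ++ [c]).length : Nat) : Int) = (path.length : Int) + 1 := by simp
        rw [hl2]
        split_ifs with h2
        · omega
        · rfl

lemma pvCount_eq_min (m : PySem.Dict (List Char) Int) (w : List Char) (hw : w ≠ []) (B : Int)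
    (hB : -1 ≤ B)
    (heq : ∀ k : Nat, k < w.length → (m.getD (w.take k) 0 = 1 ↔ B < (k : Int))) :
    pvCount m [] 0 w = min (B + 1) (w.length : Int) := by
  have h := pvCount_go m w B heq w [] (by simp) hw (by simpa using hB)
  norm_num at h
  rw [h]
  have hw' : 0 < w.length := by
    cases w with
    | nil => exact absurd rfl hw
    | cons _ _ => simp
  split_ifs with h1
  · omega
  · rfl

lemma countP_one_iff (p : String → Bool) : ∀ (s : List String) (i : Nat) (hi : i < s.length),
    p (s[i]'hi) = true →
    (s.countP p = 1 ↔ ∀ j, (hj : j < s.length) → j ≠ i → p (s[j]'hj) = false) := by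
  intro s
  induction s with
  | nil => intro i hi; simp at hi
  | cons x t ih =>
    intro i hi hp
    cases i with
    | zero =>
      simp only [List.getElem_cons_zero] at hp
      rw [List.countP_cons, hp, if_pos rfl]
      constructor
      · intro h j hj hj0
        have ht : t.countP p = 0 := by omega
        have hall := List.countP_eq_zero.mp ht
        cases j with
        | zero => exact absurd rfl hj0
        | succ j' =>
          simp only [List.getElem_cons_succ]
          have hj'' : j' < t.length := by simpa using hj
          simpa using hall _ (List.getElem_mem hj'')
      · intro h
        have ht : t.countP p = 0 := by
          apply List.countP_eq_zero.mpr
          intro a ha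
          obtain ⟨j', hj', rfl⟩ := List.mem_iff_getElem.mp ha
          simpa using h (j' + 1) (by simpa using Nat.succ_lt_succ hj') (by omega)
        omega
    | succ i' =>
      have hi' : i' < t.length := by simpa using hi
      simp only [List.getElem_cons_succ] at hp
      rw [List.countP_cons]
      by_cases hx : p x = true
      · have hpos : 0 < t.countP p := List.countP_pos_iff.mpr ⟨t[i']'hi', List.getElem_mem hi', hp⟩
        rw [hx, if_pos rfl]
        constructor
        · intro h; omega
        · intro h
          have h0 := h 0 (by simp) (by omega)
          simp only [List.getElem_cons_zero] at h0
          rw [h0] at hx; exact absurd hx (by simp)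
      · have hx' : p x = false := by simpa using hx
        rw [hx', if_neg (by simp), Nat.add_zero, ih i' hi' hp]
        constructor
        · intro h j hj hji
          cases j with
          | zero => simpa using hx'
          | succ j' =>
            simp only [List.getElem_cons_succ]
            exact h j' (by simpa using hj) (by omega)
        · intro h j' hj' hji'
          have := h (j' + 1) (by simpa using Nat.succ_lt_succ hj') (by omega)
          simpa using this

lemma prefix_between (q : List Char) : ∀ (a b c : List Char),
    a ≤ b → b ≤ c → q <+: a → q <+: c → q <+: b := by
  induction q with
  | nil => intro a b c _ _ _ _; exact List.nil_prefix
  | cons x q ih =>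
    intro a b c hab hbc hqa hqc
    rcases lt_or_eq_of_le hab with hab | rfl
    swap
    · exact hqa
    rcases lt_or_eq_of_le hbc with hbc | rfl
    swap
    · exact hqc
    obtain ⟨ta, rfl⟩ := hqa
    obtain ⟨tc, rfl⟩ := hqc
    match b with
    | [] => exact absurd hab (List.not_lt_nil _)
    | y :: b' =>
      rw [show (x :: q) ++ ta = x :: (q ++ ta) from rfl, List.cons_lt_cons_iff] at hab
      rw [show (x :: q) ++ tc = x :: (q ++ tc) from rfl, List.cons_lt_cons_iff] at hbc
      have hxy : x = y := by
        rcases hab with h | ⟨h, -⟩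
        · rcases hbc with h2 | ⟨h2, -⟩
          · exact absurd (h.trans h2) (lt_irrefl x)
          · exact h2.symm ▸ rfl
        · exact h
      subst hxy
      have hab' : q ++ ta < b' := by
        rcases hab with h | ⟨-, h⟩
        · exact absurd h (lt_irrefl x)
        · exact h
      have hbc' : b' < q ++ tc := by
        rcases hbc with h | ⟨-, h⟩
        · exact absurd h (lt_irrefl x)
        · exact h
      have := ih (q ++ ta) b' (q ++ tc) (le_of_lt hab') (le_of_lt hbc')
        (List.prefix_append _ _) (List.prefix_append _ _)
      exact List.cons_prefix_cons.mpr ⟨rfl, this⟩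

lemma no_other_iff_nbrs (s : List String) (q : List Char) (k : Nat) (hk : k < s.length)
    (hmono : ∀ (i j : Nat) (h1 : i ≤ j) (h2 : j < s.length),
      s[i]'(Nat.lt_of_le_of_lt h1 h2) ≤ s[j]'h2)
    (hq : q <+: (s[k]'hk).toList) :
    (∀ j, (hj : j < s.length) → j ≠ k → ¬ q <+: (s[j]'hj).toList)
      ↔ ((∀ _ : 0 < k, ¬ q <+: (s[k-1]'(by omega)).toList)
          ∧ (∀ h1 : k + 1 < s.length, ¬ q <+: (s[k+1]'h1).toList)) := by
  constructor
  · intro h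
    exact ⟨fun h0 => h (k-1) (by omega) (by omega), fun h1 => h (k+1) h1 (by omega)⟩
  · rintro ⟨hL, hR⟩ j hj hjk hpre
    rcases Nat.lt_or_ge j k with hlt | hge
    · have h0 : 0 < k := by omega
      apply hL h0
      have h1 : s[j]'hj ≤ s[k-1]'(by omega) := hmono j (k-1) (by omega) (by omega)
      have h2 : s[k-1]'(by omega) ≤ s[k]'hk := hmono (k-1) k (by omega) hk
      exact prefix_between q _ _ _ (String.le_iff_toList_le.mp h1)
        (String.le_iff_toList_le.mp h2) hpre hq
    · have hgt : k < j := by omega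
      apply hR (by omega)
      have h1 : s[k]'hk ≤ s[k+1]'(by omega) := hmono k (k+1) (by omega) (by omega)
      have h2 : s[k+1]'(by omega) ≤ s[j]'hj := hmono (k+1) j (by omega) hj
      exact prefix_between q _ _ _ (String.le_iff_toList_le.mp h1)
        (String.le_iff_toList_le.mp h2) hq hpre

lemma pvNbrMax_nonneg (ws : List String) (i : Int) (w : String) : 0 ≤ pvNbrMax ws i w := by
  simp only [pvNbrMax]
  split_ifs <;> simp

lemma pvNbrMax_lt_iff (s : List String) (k : Nat) (hk : k < s.length) (j : Int) (hj : 0 < j) :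
    (pvNbrMax s (k : Int) (s[k]'hk) < j ↔
      ((∀ _ : 0 < k, lcpChars (s[k]'hk).toList ((s[k-1]'(by omega)).toList) < j)
        ∧ (∀ h1 : k + 1 < s.length, lcpChars (s[k]'hk).toList ((s[k+1]'h1).toList) < j))) := by
  have hL : 0 < k → PySem.List.pyGetD s ((k : Int) - 1) "" = s[k-1]'(by omega) := by
    intro h0
    rw [show ((k : Int) - 1) = (((k - 1 : Nat) : Nat) : Int) by omega, PySem.List.pyGetD_natCast]
    exact List.getD_eq_getElem s "" (by omega)
  have hR : ∀ h1 : k + 1 < s.length, PySem.List.pyGetD s ((k : Int) + 1) "" = s[k+1]'h1 := by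
    intro h1
    rw [show ((k : Int) + 1) = (((k + 1 : Nat) : Nat) : Int) by push_cast; ring,
      PySem.List.pyGetD_natCast]
    exact List.getD_eq_getElem s "" (by omega)
  simp only [pvNbrMax]
  by_cases h0 : 0 < k <;> by_cases h1 : k + 1 < s.length
  · rw [if_pos (show (0 : Int) < (k : Int) by omega),
      if_pos (show (k : Int) + 1 < (s.length : Int) by omega), hL h0, hR h1,
      max_lt_iff, max_lt_iff]
    constructor
    · rintro ⟨⟨-, ha⟩, hb⟩
      exact ⟨fun _ => by rw [lcp_comm]; exact ha, fun _ => hb⟩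
    · rintro ⟨ha, hb⟩
      exact ⟨⟨hj, by rw [lcp_comm]; exact ha h0⟩, hb h1⟩
  · rw [if_pos (show (0 : Int) < (k : Int) by omega),
      if_neg (show ¬ (k : Int) + 1 < (s.length : Int) by omega), hL h0, max_lt_iff]
    constructor
    · rintro ⟨-, ha⟩
      exact ⟨fun _ => by rw [lcp_comm]; exact ha, fun hh => absurd hh h1⟩
    · rintro ⟨ha, -⟩
      exact ⟨hj, by rw [lcp_comm]; exact ha h0⟩
  · rw [if_neg (show ¬ (0 : Int) < (k : Int) by omega),
      if_pos (show (k : Int) + 1 < (s.length : Int) by omega), hR h1, max_lt_iff]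
    constructor
    · rintro ⟨-, hb⟩
      exact ⟨fun hh => absurd hh h0, fun _ => hb⟩
    · rintro ⟨-, hb⟩
      exact ⟨hj, hb h1⟩
  · rw [if_neg (show ¬ (0 : Int) < (k : Int) by omega),
      if_neg (show ¬ (k : Int) + 1 < (s.length : Int) by omega)]
    constructor
    · intro _
      exact ⟨fun hh => absurd hh h0, fun hh => absurd hh h1⟩
    · intro _
      exact hj

lemma cnt_eq_countP_sorted (words : List String) (q : List Char) :
    (pvBuild words).getD q 0 =
      (((PySem.List.sorted (words.filter (fun w => decide (w ≠ ""))) (fun x => x) false).countP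
        (fun u => decide (q <+: u.toList))) : Int) := by
  rw [getD_pvBuild]
  congr 1
  have hperm : (PySem.List.sorted (words.filter (fun w => decide (w ≠ ""))) (fun x => x) false).Perm
      (words.filter (fun w => decide (w ≠ ""))) := PySem.List.sorted_perm _ _ _
  rw [List.Perm.countP_eq _ hperm, List.countP_filter]
  apply List.countP_congr
  intro u _
  by_cases hu : u = ""
  · subst hu; simp
  · have hne : u.toList ≠ [] := by simpa [String.toList_eq_nil_iff] using hu
    by_cases hq : q <+: u.toList <;> simp [hu, hne, hq]

-- per-position equality of A's per-word keystroke count with B's neighbour formula,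
-- for any list s carrying the relevant facts of sorted(filtered words)
lemma contrib_eq_gen (words : List String) (s : List String)
    (hcnt : ∀ q : List Char, (pvBuild words).getD q 0 =
      ((s.countP (fun u => decide (q <+: u.toList))) : Int))
    (hnex : ∀ w ∈ s, w ≠ "")
    (hmono : ∀ (i j : Nat) (h1 : i ≤ j) (h2 : j < s.length),
      s[i]'(Nat.lt_of_le_of_lt h1 h2) ≤ s[j]'h2)
    (hn : 2 ≤ s.length) (k : Nat) (hk : k < s.length) :
    pvCount (pvBuild words) [] 0 ((s[k]'hk).toList)
      = min (pvNbrMax s (k : Int) (s[k]'hk) + 1) (PySem.Str.len (s[k]'hk)) := by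
  have hwne : (s[k]'hk) ≠ "" := hnex _ (List.getElem_mem hk)
  have hwlne : (s[k]'hk).toList ≠ [] := by simpa [String.toList_eq_nil_iff] using hwne
  have hB0 : 0 ≤ pvNbrMax s (k : Int) (s[k]'hk) := pvNbrMax_nonneg _ _ _
  have heq : ∀ jn : Nat, jn < (s[k]'hk).toList.length →
      ((pvBuild words).getD ((s[k]'hk).toList.take jn) 0 = 1
        ↔ pvNbrMax s (k : Int) (s[k]'hk) < (jn : Int)) := by
    intro jn hjn
    by_cases hjz : jn = 0
    · subst hjz
      constructor
      · intro hcontr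
        rw [hcnt, List.take_zero] at hcontr
        have hall : s.countP (fun u => decide (([] : List Char) <+: u.toList)) = s.length :=
          List.countP_eq_length.mpr (fun a _ => by simp)
        rw [hall] at hcontr
        have : s.length = 1 := by exact_mod_cast hcontr
        omega
      · intro hcontr
        exfalso
        omega
    · have hjpos : 0 < jn := Nat.pos_of_ne_zero hjz
      have hqself : (s[k]'hk).toList.take jn <+: (s[k]'hk).toList := List.take_prefix _ _
      have hone := countP_one_iff (fun u => decide (((s[k]'hk).toList.take jn) <+: u.toList)) s k hk
        (by simpa using hqself)
      have hnbr := no_other_iff_nbrs s ((s[k]'hk).toList.take jn) k hk hmono hqself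
      have hlcp : ∀ (u : String), (¬ ((s[k]'hk).toList.take jn) <+: u.toList)
          ↔ lcpChars (s[k]'hk).toList u.toList < (jn : Int) := by
        intro u
        rw [← lcp_ge_iff jn (s[k]'hk).toList u.toList (by omega)]
        omega
      have hfin := pvNbrMax_lt_iff s k hk (jn : Int) (by exact_mod_cast hjpos)
      rw [hcnt]
      constructor
      · intro h
        have h1 := hone.mp (by exact_mod_cast h)
        have h1' : ∀ j, (hj : j < s.length) → j ≠ k →
            ¬ ((s[k]'hk).toList.take jn) <+: ((s[j]'hj).toList) := by
          intro j hj hjk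
          have := h1 j hj hjk
          simpa using this
        have h2 := hnbr.mp h1'
        rw [hfin]
        exact ⟨fun h0 => (hlcp _).mp (h2.1 h0), fun hr => (hlcp _).mp (h2.2 hr)⟩
      · intro h
        rw [hfin] at h
        have h2 : (∀ _ : 0 < k, ¬ ((s[k]'hk).toList.take jn) <+: ((s[k-1]'(by omega)).toList))
            ∧ (∀ h1 : k + 1 < s.length, ¬ ((s[k]'hk).toList.take jn) <+: ((s[k+1]'h1).toList)) :=
          ⟨fun h0 => (hlcp _).mpr (h.1 h0), fun hr => (hlcp _).mpr (h.2 hr)⟩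
        have h1' := hnbr.mpr h2
        have := hone.mpr (by intro j hj hjk; simpa using h1' j hj hjk)
        exact_mod_cast this
  rw [pvCount_eq_min (pvBuild words) (s[k]'hk).toList hwlne (pvNbrMax s (k : Int) (s[k]'hk))
    (by omega) heq, PySem.Str.len_eq]

lemma sum_map_filter_zero (f : String → Int) (l : List String) (h0 : f "" = 0) :
    ((l.filter (fun w => decide (w ≠ ""))).map f).sum = (l.map f).sum := by
  induction l with
  | nil => rfl
  | cons x t ih =>
    rw [List.filter_cons]
    by_cases hx : x = ""
    · subst hx
      rw [if_neg (by simp), List.map_cons, List.sum_cons, ih, h0, zero_add]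
    · rw [if_pos (by simp [hx]), List.map_cons, List.map_cons, List.sum_cons, List.sum_cons, ih]

-- ===== VERDICT (by name: the statement is the Claim_ definition above) =====
theorem solution_spec : Claim_equal_solution := by
  unfold Claim_equal_solution
  intro words _
  simp only [Spec_solution, solution, solution_alt]
  rw [PySem.List.foldl_add]
  set s := PySem.List.sorted (words.filter (fun w => decide (w ≠ ""))) (fun x => x) false with hs
  have hf0 : pvCount (pvBuild words) [] 0 ("" : String).toList = 0 := by
    rw [show ("" : String).toList = ([] : List Char) from rfl]
    rfl
  have hAsum : (words.map (fun w => pvCount (pvBuild words) [] 0 w.toList)).sum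
      = (s.map (fun w => pvCount (pvBuild words) [] 0 w.toList)).sum := by
    rw [← sum_map_filter_zero (fun w => pvCount (pvBuild words) [] 0 w.toList) words hf0]
    refine (List.Perm.sum_eq ?_).symm
    refine List.Perm.map _ ?_
    rw [hs]
    exact PySem.List.sorted_perm _ _ _
  rw [zero_add, hAsum]
  have hnex : ∀ w ∈ s, w ≠ "" := by
    intro w hw
    rw [hs] at hw
    have := (PySem.List.mem_sorted _ _ _ _).mp hw
    simpa using (List.mem_filter.mp this).2
  have hcnt : ∀ q : List Char, (pvBuild words).getD q 0 =
      ((s.countP (fun u => decide (q <+: u.toList))) : Int) := by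
    intro q
    rw [cnt_eq_countP_sorted, hs]
  by_cases hlen : s.length ≤ 1
  · rw [if_pos hlen]
    apply List.sum_eq_zero
    intro x hx
    obtain ⟨w, hw, rfl⟩ := List.mem_map.mp hx
    have hwne : w ≠ "" := hnex w hw
    have hwl : w.toList ≠ [] := by simpa [String.toList_eq_nil_iff] using hwne
    have heq1 : ∀ jn : Nat, jn < w.toList.length →
        ((pvBuild words).getD (w.toList.take jn) 0 = 1 ↔ (-1 : Int) < (jn : Int)) := by
      intro jn _
      constructor
      · intro _
        omega
      · intro _
        rw [hcnt]
        have hle := List.countP_le_length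
          (p := fun u => decide ((w.toList.take jn) <+: u.toList)) (l := s)
        have hpos : 0 < s.countP (fun u => decide ((w.toList.take jn) <+: u.toList)) :=
          List.countP_pos_iff.mpr ⟨w, hw, by simpa using List.take_prefix jn w.toList⟩
        have h1 : s.countP (fun u => decide ((w.toList.take jn) <+: u.toList)) = 1 := by omega
        rw [h1]
        norm_num
    rw [pvCount_eq_min (pvBuild words) w.toList hwl (-1) (by omega) heq1]
    omega
  · rw [if_neg hlen, PySem.List.foldl_add, zero_add]
    have hmono : ∀ (i j : Nat) (h1 : i ≤ j) (h2 : j < s.length),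
        s[i]'(Nat.lt_of_le_of_lt h1 h2) ≤ s[j]'h2 := by
      rw [hs]
      intro i j h1 h2
      exact PySem.List.key_sorted_getElem_mono _ (fun x => x) h1 h2
    have hmap : s.map (fun w => pvCount (pvBuild words) [] 0 w.toList)
        = (PySem.List.enumerate s).map
            (fun iw => min (pvNbrMax s iw.1 iw.2 + 1) (PySem.Str.len iw.2)) := by
      conv_lhs => rw [← PySem.List.map_snd_enumerate s 0, List.map_map]
      apply List.map_congr_left
      intro iw hiw
      obtain ⟨kk, hkk, rfl⟩ := (PySem.List.mem_enumerate_iff s 0 iw).mp hiw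
      simp only [Function.comp_apply, zero_add]
      exact contrib_eq_gen words s hcnt hnex hmono (by omega) kk hkk
    rw [hmap]
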